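-- pv_equiv track=rewrite | github.com/Card-Forge/forge | forge-gui/tools/frenchTranslations.py | convertMana
-- ===== SOURCE A (Python) =====
-- def convertMana(cardInfo: str) -> str:
-- 	"""Convert HTML tag to Forge MTG compatible tags."""
-- 	# Replace all symbol by its correspondance
-- 	symbol = ['A', 'B', 'C', 'D', 'E', 'F', 'G', 'H', 'I', 'J', 'K', 'L', 'M', 'N', 'O', 'P', 'Q', 'R', 'S', 'T', 'U', 'V', 'W', 'X', 'Y', 'Z', '0', '1', '2', '3', '4', '5', '6', '7', '8', '9', '10', '11', '12', '13', '14', '15', '16', '17', '18', '19', '20', '100', '(', ')', '!']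
--
-- 	card: str = str(cardInfo)
-- 	card = card.replace('\n', '')
-- 	card = card.replace('<br/>', '\\n')
-- 	card = card.replace('<br />', '\\n')
-- 	card = card.replace('<br>', '\\n')
-- 	card = card.replace('</img>', '')
-- 	card = card.replace('<div class="txt">', '')
-- 	card = card.replace('</div>', '')
-- 	card = card.replace('/>', '')
-- 	card = card.replace('>', '')
--
-- 	for sym in symbol:
-- 		card = card.replace('<img src="/img/symbole/mana/' + sym + '.png"', '{' + sym + '}')
--
-- 	return card
-- ===== SOURCE B (Python) =====
-- SYMBOLS = (frozenset(chr(u) for u in range(ord('A'), ord('Z') + 1))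
--            | frozenset(str(n) for n in range(21))
--            | {'100', '(', ')', '!'})
--
-- PRE = '<img src="/img/symbole/mana/'
--
-- CLEANUPS = (('\n', ''), ('<br/>', '\\n'), ('<br />', '\\n'), ('<br>', '\\n'),
--             ('</img>', ''), ('<div class="txt">', ''), ('</div>', ''),
--             ('/>', ''), ('>', ''))
--
--
-- def convertMana(cardInfo: str) -> str:
--     """Convert HTML tag to Forge MTG compatible tags."""
--     card = str(cardInfo)
--     for old, new in CLEANUPS:
--         card = card.replace(old, new)
--     # Single left-to-right scan: at each mana-image prefix, the closing '"' is the
--     # first '"' after the prefix; accept iff it is preceded by '.png' and the symbol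
--     # between prefix and '.png' is whitelisted.
--     out = []
--     i = 0
--     n = len(card)
--     while i < n:
--         if card.startswith(PRE, i):
--             q = card.find('"', i + len(PRE))
--             if q != -1 and card[q - 4:q] == '.png' and card[i + len(PRE):q - 4] in SYMBOLS:
--                 out.append('{' + card[i + len(PRE):q - 4] + '}')
--                 i = q + 1
--                 continue
--         out.append(card[i])
--         i += 1
--     return ''.join(out)
-- ===== Notes on version B (the rewrite author's own statement) =====
-- stated objective: alternative
-- what changed: Replaces the 50-iteration loop of whole-string .replace() passes (one per whitelisted symbol) with a single left-to-right scan that, at each mana-image prefix, locates the closing quote once and decides the rewrite by one set-membership test.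
import Mathlib
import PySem

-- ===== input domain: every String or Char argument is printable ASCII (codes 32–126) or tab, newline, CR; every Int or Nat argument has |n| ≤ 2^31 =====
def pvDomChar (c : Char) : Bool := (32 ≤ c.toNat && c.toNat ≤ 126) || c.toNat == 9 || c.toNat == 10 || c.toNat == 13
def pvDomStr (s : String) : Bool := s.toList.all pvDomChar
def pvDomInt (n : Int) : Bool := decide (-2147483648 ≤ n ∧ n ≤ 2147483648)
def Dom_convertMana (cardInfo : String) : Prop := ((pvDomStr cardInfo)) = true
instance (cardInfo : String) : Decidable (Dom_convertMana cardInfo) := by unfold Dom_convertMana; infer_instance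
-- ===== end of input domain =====

-- B replaces A's 50 whole-string .replace passes (one per whitelisted symbol) by one
-- left-to-right scan with a set lookup; equivalence is proved for every input string.

-- ===== PORT A =====
def symbolList : List String := ["A","B","C","D","E","F","G","H","I","J","K","L","M","N","O","P","Q","R","S","T","U","V","W","X","Y","Z","0","1","2","3","4","5","6","7","8","9","10","11","12","13","14","15","16","17","18","19","20","100","(",")","!"]

def convertMana (cardInfo : String) : String :=
  let card := cardInfo
  let card := PySem.Str.replace card "\n" ""
  let card := PySem.Str.replace card "<br/>" "\\n"
  let card := PySem.Str.replace card "<br />" "\\n"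
  let card := PySem.Str.replace card "<br>" "\\n"
  let card := PySem.Str.replace card "</img>" ""
  let card := PySem.Str.replace card "<div class=\"txt\">" ""
  let card := PySem.Str.replace card "</div>" ""
  let card := PySem.Str.replace card "/>" ""
  let card := PySem.Str.replace card ">" ""
  List.foldl
    (fun c sym =>
      PySem.Str.replace c ("<img src=\"/img/symbole/mana/" ++ sym ++ ".png\"") ("{" ++ sym ++ "}"))
    card symbolList

-- ===== PORT B =====
-- B-side helpers (the module-level constants of Source B, on List Char)
def bSymbols : PySem.Set (List Char) :=
  PySem.Set.union
    (PySem.Set.union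
      (PySem.Set.ofList ((PySem.List.pyRange 65 91 1).map (fun u => [Char.ofNat u.toNat])))
      (PySem.Set.ofList ((PySem.List.pyRange 0 21 1).map PySem.Int.toChars)))
    [['1','0','0'], ['('], [')'], ['!']]
def preL : List Char := '<' :: "img src=\"/img/symbole/mana/".toList   -- PRE (head exposed for the scan)
def pngL : List Char := ['.', 'p', 'n', 'g']
def bCleanups : List (String × String) :=
  [("\n", ""), ("<br/>", "\\n"), ("<br />", "\\n"), ("<br>", "\\n"), ("</img>", ""),
   ("<div class=\"txt\">", ""), ("</div>", ""), ("/>", ""), (">", "")]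

-- the while-loop of Source B: index arithmetic becomes recursion on the suffix
-- (card.startswith(PRE, i) = isPrefixOf on the suffix; card.find('"', i+28),
--  card[q-4:q], card[i+28:q-4], i = q+1 become the same drop/take on the suffix)
def scanB : List Char → List Char
  | [] => []
  | c :: t =>
    if preL.isPrefixOf (c :: t) then
      match ((c :: t).drop 28).findIdx? (· == '"') with
      | some q =>
        if ((c :: t).drop (q + 24)).take 4 = pngL ∧ ((c :: t).drop 28).take (q - 4) ∈ bSymbols then
          '{' :: (((c :: t).drop 28).take (q - 4) ++ '}' :: scanB ((c :: t).drop (29 + q)))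
        else c :: scanB t
      | none => c :: scanB t
    else c :: scanB t
  termination_by cs => cs.length
  decreasing_by all_goals simp <;> omega

def convertMana_alt (cardInfo : String) : String :=
  let card := List.foldl (fun c p => PySem.Str.replace c p.1 p.2) cardInfo bCleanups
  String.ofList (scanB card.toList)

-- ===== PRECONDITION & SPEC =====
def Spec_convertMana (cardInfo : String) (out : String) : Prop := out = convertMana_alt cardInfo
instance (cardInfo : String) (out : String) : Decidable (Spec_convertMana cardInfo out) := by unfold Spec_convertMana; infer_instance

-- ===== CLAIM (what is proved, stated in full; the proofs are below) =====
def Claim_equal_convertMana : Prop := ∀ (cardInfo : String), Dom_convertMana cardInfo → Spec_convertMana cardInfo (convertMana cardInfo)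

-- ===== LEMMAS AND PROOFS =====

-- proof-side helpers -------------------------------------------------------
def symL : List (List Char) := symbolList.map String.toList


-- non-accumulator form of Python's str.replace on char lists (old ≠ [])
def repl (old new : List Char) : List Char → List Char
  | [] => []
  | c :: t =>
    if old.isPrefixOf (c :: t) then new ++ repl old new (t.drop (old.length - 1))
    else c :: repl old new t
  termination_by l => l.length
  decreasing_by all_goals simp <;> omega

def patT (sym : List Char) : List Char := sym ++ pngL ++ ['"']     -- pattern after PRE
def patL (sym : List Char) : List Char := preL ++ patT sym          -- full pattern of A's loop
def repL (sym : List Char) : List Char := '{' :: (sym ++ ['}'])     -- its replacement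

def stepA (acc : List Char) (sym : List Char) : List Char := repl (patL sym) (repL sym) acc
def foldAll (cs : List Char) : List Char := List.foldl stepA cs symL

-- decided facts about the 50 symbols ---------------------------------------
lemma symL_chars : ∀ a ∈ symL, '"' ∉ a ∧ '{' ∉ a ∧ '<' ∉ a := by decide

lemma symL_nodup : symL.Nodup := by decide

set_option maxRecDepth 8000 in
lemma bSymbols_eq : bSymbols = symL := by decide

set_option maxHeartbeats 1000000 in
lemma patT_not_prefix : ∀ a ∈ symL, ∀ b ∈ symL, a ≠ b → (patT a).isPrefixOf (patT b) = false := by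
  decide

-- replace = repl -----------------------------------------------------------
lemma repl_go (old new : List Char) (hold : old ≠ []) :
    ∀ fuel l acc, l.length ≤ fuel →
      PySem.Chars.replace.go old new fuel l acc = acc.reverse ++ repl old new l := by
  intro fuel
  induction fuel with
  | zero =>
    intro l acc hl
    have : l = [] := by cases l <;> simp_all
    subst this
    simp [PySem.Chars.replace.go, repl]
  | succ n ih =>
    intro l acc hl
    cases l with
    | nil => simp [PySem.Chars.replace.go, repl]
    | cons c t =>
      rw [PySem.Chars.replace.go]
      by_cases hp : old.isPrefixOf (c :: t)
      · simp only [hp, if_true]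
        have hlen : (List.drop old.length (c :: t)).length ≤ n := by
          have : 1 ≤ old.length := by cases old <;> simp_all
          simp at hl ⊢
          omega
        rw [ih _ _ hlen]
        rw [repl]
        simp only [hp, if_true]
        have : List.drop old.length (c :: t) = t.drop (old.length - 1) := by
          obtain ⟨o, os, rfl⟩ : ∃ o os, old = o :: os := by
            cases old with | nil => exact absurd rfl hold | cons o os => exact ⟨o, os, rfl⟩
          simp
        rw [this]
        simp
      · simp only [hp, if_false]
        have hlen : t.length ≤ n := by simp at hl; omega
        rw [ih _ _ hlen, repl]
        simp [hp]

lemma chars_replace_eq (old new s : List Char) (hold : old ≠ []) :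
    PySem.Chars.replace s old new = repl old new s := by
  rw [PySem.Chars.replace]
  have : old.isEmpty = false := by cases old <;> simp_all
  rw [this]
  simpa using repl_go old new hold s.length s [] le_rfl

-- structural lemmas about repl ---------------------------------------------
lemma repl_nil (old new : List Char) : repl old new [] = [] := by simp [repl]

lemma repl_cons_neg (old new : List Char) (c : Char) (t : List Char)
    (h : ¬ old.isPrefixOf (c :: t)) : repl old new (c :: t) = c :: repl old new t := by
  rw [repl]; simp [h]

lemma repl_noCreate (old r : List Char) (hold : old ≠ []) :
    ∀ (u Q : List Char), '{' ∉ Q → Q.isPrefixOf (repl old ('{' :: r) u) → Q.isPrefixOf u := by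
  intro u
  induction hu : u.length using Nat.strong_induction_on generalizing u with
  | _ n ih =>
    subst hu
    intro Q hQ
    cases u with
    | nil => simp [repl]
    | cons c t =>
      rw [repl]
      by_cases hp : old.isPrefixOf (c :: t)
      · simp only [hp, if_true]
        intro h
        cases Q with
        | nil => simp
        | cons q Q' =>
          exfalso
          simp [List.isPrefixOf] at h
          obtain ⟨rfl, -⟩ := h
          exact hQ (by simp)
      · simp only [hp, if_false]
        cases Q with
        | nil => simp
        | cons q Q' =>
          intro h
          simp [List.isPrefixOf] at h ⊢
          obtain ⟨rfl, h2⟩ := h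
          refine ⟨rfl, ?_⟩
          have := ih t.length (by simp) t rfl Q' (by intro hm; exact hQ (by simp [hm])) (by simpa using h2)
          simpa using this

lemma repl_distr (old new : List Char) :
    ∀ (w X : List Char), (∀ i, i < w.length → ¬ old.isPrefixOf (w.drop i ++ X)) →
    repl old new (w ++ X) = w ++ repl old new X := by
  intro w
  induction w with
  | nil => intro X h; simp
  | cons d w' ih =>
    intro X h
    have h0 : ¬ old.isPrefixOf (d :: (w' ++ X)) := by
      have := h 0 (by simp)
      simpa using this
    rw [List.cons_append, repl_cons_neg _ _ _ _ h0, ih X]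
    · rfl
    · intro i hi
      have := h (i + 1) (by simp; omega)
      simpa using this

-- head arguments -----------------------------------------------------------
lemma not_prefix_of_head_ne {p l : List Char} {a b : Char}
    (h : a ≠ b) : ¬ (a :: p).isPrefixOf (b :: l) := by
  simp [List.isPrefixOf]; intro hab; exact absurd hab h

lemma patT_no_lt (sym : List Char) (hs : sym ∈ symL) : '<' ∉ patT sym := by
  intro hm
  rcases List.mem_append.mp hm with h | h
  · rcases List.mem_append.mp h with h' | h'
    · exact (symL_chars sym hs).2.2 h'
    · exact absurd h' (by decide)
  · exact absurd h (by decide)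

lemma patL_tail_no_lt (sym : List Char) (hs : sym ∈ symL) :
    '<' ∉ ("img src=\"/img/symbole/mana/".toList ++ patT sym) := by
  intro hm
  rcases List.mem_append.mp hm with h | h
  · exact absurd h (by decide)
  · exact patT_no_lt sym hs h

lemma patL_no_brace (sym : List Char) (hs : sym ∈ symL) : '{' ∉ patL sym := by
  intro hm
  rcases List.mem_append.mp hm with h | h
  · exact absurd h (by decide)
  · rcases List.mem_append.mp h with h' | h'
    · rcases List.mem_append.mp h' with h'' | h''
      · exact (symL_chars sym hs).2.1 h''
      · exact absurd h'' (by decide)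
    · exact absurd h' (by decide)

lemma repL_no_lt (sym : List Char) (hs : sym ∈ symL) : '<' ∉ repL sym := by
  intro hm
  rcases List.mem_cons.mp hm with h | h
  · exact absurd h (by decide)
  · rcases List.mem_append.mp h with h' | h'
    · exact (symL_chars sym hs).2.2 h'
    · exact absurd h' (by decide)

lemma patL_ne_nil (sym : List Char) : patL sym ≠ [] := by simp [patL, preL]

-- no pattern can match strictly inside another pattern / inside a replacement
lemma no_prefix_inside (w X : List Char) (s : List Char)
    (hw : '<' ∉ w) : ∀ i, i < w.length → ¬ (patL s).isPrefixOf (w.drop i ++ X) := by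
  intro i hi
  obtain ⟨h, tl, hw'⟩ : ∃ h tl, w.drop i = h :: tl := by
    cases hd : w.drop i with
    | nil =>
      exfalso
      have := List.length_drop (l := w) (i := i)
      rw [hd] at this; simp at this; omega
    | cons h tl => exact ⟨h, tl, rfl⟩
  have hmem : h ∈ w := by
    have : h ∈ w.drop i := by rw [hw']; simp
    exact List.mem_of_mem_drop this
  have hne' : h ≠ '<' := fun hh => hw (hh ▸ hmem)
  rw [hw']
  show ¬ (patL s).isPrefixOf (h :: (tl ++ X))
  rw [patL, preL]
  simp only [List.cons_append]
  exact not_prefix_of_head_ne (fun hh => hne' hh.symm)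

lemma not_patL_prefix_patL_append (s sym : List Char) (hs : s ∈ symL) (hsym : sym ∈ symL)
    (hne : s ≠ sym) (X : List Char) : ¬ (patL s).isPrefixOf (patL sym ++ X) := by
  intro h
  rw [List.isPrefixOf_iff_prefix] at h
  rw [patL, patL, List.append_assoc] at h
  rw [List.prefix_append_right_inj] at h
  have hcases := List.prefix_or_prefix_of_prefix h (List.prefix_append (patT sym) X)
  rcases hcases with h' | h'
  · have := patT_not_prefix s hs sym hsym hne
    rw [← List.isPrefixOf_iff_prefix] at h'
    simp [this] at h'
  · have := patT_not_prefix sym hsym s hs (fun hh => hne hh.symm)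
    rw [← List.isPrefixOf_iff_prefix] at h'
    simp [this] at h'

-- fold lemmas --------------------------------------------------------------
lemma foldl_stepA_nil (L : List (List Char)) : List.foldl stepA [] L = [] := by
  induction L with
  | nil => rfl
  | cons s L ih => simpa [stepA, repl_nil] using ih

lemma isPrefixOf_self_append (l X : List Char) : l.isPrefixOf (l ++ X) := by
  rw [List.isPrefixOf_iff_prefix]; exact List.prefix_append l X

lemma patL_cons (sym : List Char) :
    patL sym = '<' :: ("img src=\"/img/symbole/mana/".toList ++ patT sym) := by
  simp [patL, preL]

lemma foldl_stepA_cons (c : Char) :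
    ∀ (L : List (List Char)) (u : List Char), (∀ s ∈ L, s ∈ symL) →
      (∀ s ∈ L, ¬ (patL s).isPrefixOf (c :: u)) →
      List.foldl stepA (c :: u) L = c :: List.foldl stepA u L := by
  intro L
  induction L with
  | nil => intro u _ _; rfl
  | cons s L' ih =>
    intro u hmem hpre
    have hs : s ∈ symL := hmem s (by simp)
    have h0 : ¬ (patL s).isPrefixOf (c :: u) := hpre s (by simp)
    have hstep : stepA (c :: u) s = c :: stepA u s := by
      simp only [stepA]
      exact repl_cons_neg _ _ _ _ h0
    simp only [List.foldl_cons, hstep]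
    apply ih
    · intro s' hs'; exact hmem s' (by simp [hs'])
    · intro s' hs'
      intro hpre'
      have hs'' : s' ∈ symL := hmem s' (by simp [hs'])
      rw [patL_cons s'] at hpre'
      simp only [List.isPrefixOf, Bool.and_eq_true, beq_iff_eq] at hpre'
      obtain ⟨hc, htail⟩ := hpre'
      have hnb : '{' ∉ ("img src=\"/img/symbole/mana/".toList ++ patT s') := by
        intro hm
        exact patL_no_brace s' hs'' (by rw [patL_cons s']; exact List.mem_cons.mpr (Or.inr hm))
      have habs : ("img src=\"/img/symbole/mana/".toList ++ patT s').isPrefixOf u := by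
        apply repl_noCreate (patL s) (s ++ ['}']) (patL_ne_nil s) u _ hnb
        simpa [stepA, repL] using htail
      apply hpre s' (by simp [hs'])
      rw [patL_cons s']
      simp only [List.isPrefixOf, Bool.and_eq_true, beq_iff_eq]
      exact ⟨hc, habs⟩

-- a foreign pattern matches nowhere inside patL sym, whatever follows
lemma patL_inside (s sym : List Char) (hs : s ∈ symL) (hsym : sym ∈ symL) (hne : s ≠ sym)
    (X : List Char) : ∀ i, i < (patL sym).length → ¬ (patL s).isPrefixOf ((patL sym).drop i ++ X) := by
  intro i hi
  rcases Nat.eq_zero_or_pos i with rfl | hipos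
  · simpa using not_patL_prefix_patL_append s sym hs hsym hne X
  · rw [patL_cons sym]
    have hdrop : ('<' :: ("img src=\"/img/symbole/mana/".toList ++ patT sym)).drop i
        = ("img src=\"/img/symbole/mana/".toList ++ patT sym).drop (i - 1) := by
      obtain ⟨j, rfl⟩ : ∃ j, i = j + 1 := ⟨i - 1, by omega⟩
      simp
    rw [hdrop]
    apply no_prefix_inside _ X s (patL_tail_no_lt sym hsym)
    rw [patL_cons sym] at hi
    simp at hi ⊢
    omega

lemma foldl_stepA_pat (sym : List Char) (hsym : sym ∈ symL) :
    ∀ (L : List (List Char)) (X : List Char), (∀ s ∈ L, s ∈ symL ∧ s ≠ sym) →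
      List.foldl stepA (patL sym ++ X) L = patL sym ++ List.foldl stepA X L := by
  intro L
  induction L with
  | nil => intro X _; rfl
  | cons s L' ih =>
    intro X hmem
    have hs := hmem s (by simp)
    have hstep : stepA (patL sym ++ X) s = patL sym ++ stepA X s := by
      simp only [stepA]
      exact repl_distr _ _ _ _ (patL_inside s sym hs.1 hsym hs.2 X)
    simp only [List.foldl_cons, hstep]
    exact ih _ (fun s' hs' => hmem s' (by simp [hs']))

lemma foldl_stepA_rep (sym : List Char) (hsym : sym ∈ symL) :
    ∀ (L : List (List Char)) (X : List Char), (∀ s ∈ L, s ∈ symL) →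
      List.foldl stepA (repL sym ++ X) L = repL sym ++ List.foldl stepA X L := by
  intro L
  induction L with
  | nil => intro X _; rfl
  | cons s L' ih =>
    intro X hmem
    have hs := hmem s (by simp)
    have hstep : stepA (repL sym ++ X) s = repL sym ++ stepA X s := by
      simp only [stepA]
      exact repl_distr _ _ _ _ (no_prefix_inside _ X s (repL_no_lt sym hsym))
    simp only [List.foldl_cons, hstep]
    exact ih _ (fun s' hs' => hmem s' (by simp [hs']))

lemma repl_self (old new X : List Char) (hold : old ≠ []) :
    repl old new (old ++ X) = new ++ repl old new X := by
  obtain ⟨o, ot, rfl⟩ : ∃ o ot, old = o :: ot := by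
    cases old with | nil => exact absurd rfl hold | cons o ot => exact ⟨o, ot, rfl⟩
  rw [List.cons_append, repl]
  rw [if_pos (by simpa using isPrefixOf_self_append (o :: ot) X)]
  congr 1
  congr 1
  simpa using List.drop_left' (l₁ := ot) (l₂ := X) rfl

lemma stepA_pat_self (sym : List Char) (X : List Char) :
    stepA (patL sym ++ X) sym = repL sym ++ stepA X sym := by
  simp only [stepA]
  exact repl_self _ _ _ (patL_ne_nil sym)

lemma foldAll_pat (sym : List Char) (hsym : sym ∈ symL) (X : List Char) :
    foldAll (patL sym ++ X) = repL sym ++ foldAll X := by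
  obtain ⟨L1, L2, hsplit⟩ := List.append_of_mem hsym
  have hnd : (L1 ++ sym :: L2).Nodup := hsplit ▸ symL_nodup
  have hdisj := List.disjoint_of_nodup_append hnd
  have hL1 : ∀ s ∈ L1, s ∈ symL ∧ s ≠ sym := by
    intro s hs
    refine ⟨hsplit ▸ List.mem_append.mpr (Or.inl hs), ?_⟩
    intro rfl'
    exact hdisj hs (rfl' ▸ by simp)
  have hL2 : ∀ s ∈ L2, s ∈ symL := by
    intro s hs
    exact hsplit ▸ List.mem_append.mpr (Or.inr (by simp [hs]))
  unfold foldAll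
  rw [hsplit, List.foldl_append, List.foldl_append]
  rw [foldl_stepA_pat sym hsym L1 X hL1]
  simp only [List.foldl_cons]
  rw [stepA_pat_self]
  exact foldl_stepA_rep sym hsym L2 _ hL2

lemma foldAll_cons (c : Char) (u : List Char)
    (h : ∀ s ∈ symL, ¬ (patL s).isPrefixOf (c :: u)) :
    foldAll (c :: u) = c :: foldAll u := by
  exact foldl_stepA_cons c symL u (fun s hs => hs) h

-- scanB lemmas -------------------------------------------------------------
set_option maxRecDepth 2000 in
lemma preL_length : preL.length = 28 := by decide

set_option maxRecDepth 4000 in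
lemma findIdx_quote (sym : List Char) (hq : '"' ∉ sym) (X : List Char) :
    (sym ++ (pngL ++ '"' :: X)).findIdx? (· == '"') = some (sym.length + 4) := by
  rw [List.findIdx?_append]
  have h1 : sym.findIdx? (· == '"') = none := by
    rw [List.findIdx?_eq_none_iff]
    intro x hx
    simp only [beq_eq_false_iff_ne, ne_eq]
    intro rfl'; exact hq (rfl' ▸ hx)
  rw [h1]
  rw [List.findIdx?_append]
  have h2 : pngL.findIdx? (· == '"') = none := by
    rw [List.findIdx?_eq_none_iff]
    intro x hx
    simp only [beq_eq_false_iff_ne, ne_eq]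
    rintro rfl
    exact (by decide : ('"' : Char) ∉ pngL) hx
  rw [h2]
  have h3 : ('"' :: X).findIdx? (· == '"') = some 0 := by
    rw [List.findIdx?_cons]; simp
  rw [h3]
  simp [pngL]
  omega

set_option maxRecDepth 8000 in
lemma scanB_pat (sym : List Char) (hsym : sym ∈ symL) (X : List Char) :
    scanB (patL sym ++ X) = repL sym ++ scanB X := by
  have hq : '"' ∉ sym := (symL_chars sym hsym).1
  have hshape : patL sym ++ X = '<' :: ("img src=\"/img/symbole/mana/".toList ++ (patT sym ++ X)) := by
    simp [patL, preL, patT]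
  have hpre2 : preL.isPrefixOf (patL sym ++ X) = true := by
    rw [patL, List.append_assoc]
    exact isPrefixOf_self_append preL (patT sym ++ X)
  have hdrop28 : (patL sym ++ X).drop 28 = sym ++ (pngL ++ '"' :: X) := by
    rw [patL, List.append_assoc, List.drop_left' preL_length]
    simp [patT]
  have hfind : ((patL sym ++ X).drop 28).findIdx? (· == '"') = some (sym.length + 4) := by
    rw [hdrop28]; exact findIdx_quote sym hq X
  have hpng : ((patL sym ++ X).drop (sym.length + 4 + 24)).take 4 = pngL := by
    have : patL sym ++ X = (preL ++ sym) ++ (pngL ++ '"' :: X) := by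
      simp [patL, patT]
    rw [this, List.drop_left' (by simp [preL_length]; omega)]
    exact List.take_left' (by simp [pngL])
  have hcap : ((patL sym ++ X).drop 28).take (sym.length + 4 - 4) = sym := by
    rw [hdrop28]
    simp only [Nat.add_sub_cancel]
    exact List.take_left' rfl
  have hrest : (patL sym ++ X).drop (29 + (sym.length + 4)) = X := by
    rw [List.drop_left' (by simp [patL, patT, preL_length, pngL]; omega)]
  rw [hshape, scanB]
  rw [← hshape]
  rw [hpre2]
  simp only [if_true, hfind]
  rw [hpng, hcap, hrest]
  have hmem : sym ∈ bSymbols := by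
    rw [bSymbols_eq]
    exact hsym
  simp only [hmem, and_true, if_pos rfl, repL]
  simp

lemma scanB_cons (c : Char) (u : List Char)
    (h : ∀ s ∈ symL, ¬ (patL s).isPrefixOf (c :: u)) :
    scanB (c :: u) = c :: scanB u := by
  rw [scanB]
  by_cases hpre : preL.isPrefixOf (c :: u)
  case neg => simp [hpre]
  case pos =>
    obtain ⟨w, hw⟩ := List.isPrefixOf_iff_prefix.mp hpre
    have hdrop : (c :: u).drop 28 = w := by rw [← hw, List.drop_left' preL_length]
    cases hfq : ((c :: u).drop 28).findIdx? (· == '"') with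
    | none => simp [hpre, hfq]
    | some q =>
      simp only [hpre, if_true, hfq]
      by_cases hcond : ((c :: u).drop (q + 24)).take 4 = pngL ∧ ((c :: u).drop 28).take (q - 4) ∈ bSymbols
      case neg => rw [if_neg hcond]
      case pos =>
        exfalso
        rw [hdrop] at hfq
        obtain ⟨hqlt, hqc, hmin⟩ := List.findIdx?_eq_some_iff_getElem.mp hfq
        have hqc' : w[q] = '"' := by simpa using hqc
        have hhead : ((c :: u).drop (q + 24)).head? = some '.' := by
          have hsplit : (c :: u).drop (q + 24) = pngL ++ ((c :: u).drop (q + 24)).drop 4 := by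
            conv_lhs => rw [← List.take_append_drop 4 ((c :: u).drop (q + 24))]
            rw [hcond.1]
          rw [hsplit]
          rfl
        have h4 : 4 ≤ q := by
          by_contra h4
          have hdropsm : (c :: u).drop (q + 24) = preL.drop (q + 24) ++ w := by
            rw [← hw, List.drop_append]
            have : q + 24 - preL.length = 0 := by rw [preL_length]; omega
            rw [this, List.drop_zero]
          rw [hdropsm, List.head?_append] at hhead
          have hplt : q + 24 < preL.length := by rw [preL_length]; omega
          rw [List.head?_drop] at hhead
          obtain ⟨a, ha⟩ : ∃ a, preL[q + 24]? = some a := by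
            rw [List.getElem?_eq_getElem hplt]; exact ⟨_, rfl⟩
          rw [ha, Option.some_or] at hhead
          have ha' : preL[q + 24]? = some '.' := by rw [ha, hhead]
          interval_cases q <;> revert ha' <;> decide
        -- q ≥ 4: reconstruct a whitelisted pattern at this position
        have hpng : (c :: u).drop (q + 24) = w.drop (q - 4) := by
          rw [← hw, List.drop_append]
          have h1 : preL.drop (q + 24) = [] :=
            List.drop_eq_nil_of_le (by rw [preL_length]; omega)
          have h2 : q + 24 - preL.length = q - 4 := by rw [preL_length]; omega
          rw [h1, h2, List.nil_append]
        have hw4 : (w.drop (q - 4)).take 4 = pngL := by rw [← hpng]; exact hcond.1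
        have hwq : w.drop (q - 4) = pngL ++ ('"' :: w.drop (q + 1)) := by
          conv_lhs => rw [← List.take_append_drop 4 (w.drop (q - 4))]
          rw [hw4, List.drop_drop]
          have : q - 4 + 4 = q := by omega
          rw [this, List.drop_eq_getElem_cons hqlt, hqc']
        have hwdec : w = w.take (q - 4) ++ (pngL ++ ('"' :: w.drop (q + 1))) := by
          conv_lhs => rw [← List.take_append_drop (q - 4) w]
          rw [hwq]
        have hsym : w.take (q - 4) ∈ symL := by
          have := hcond.2
          rw [hdrop] at this
          rw [bSymbols_eq] at this
          exact this
        apply h (w.take (q - 4)) hsym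
        rw [List.isPrefixOf_iff_prefix]
        refine ⟨w.drop (q + 1), ?_⟩
        rw [patL, patT, ← hw]
        conv_rhs => rw [hwdec]
        simp [pngL, List.append_assoc]

-- main ---------------------------------------------------------------------
lemma patL_length (sym : List Char) : (patL sym).length = sym.length + 33 := by
  simp [patL, patT, preL_length, pngL]
  omega

lemma main_aux : ∀ n cs, cs.length ≤ n → foldAll cs = scanB cs := by
  intro n
  induction n with
  | zero =>
    intro cs hcs
    have : cs = [] := by cases cs <;> simp_all
    subst this
    simp [foldAll, foldl_stepA_nil, scanB]
  | succ n ih =>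
    intro cs hcs
    cases cs with
    | nil => simp [foldAll, foldl_stepA_nil, scanB]
    | cons c t =>
      by_cases hM : ∃ sym ∈ symL, (patL sym).isPrefixOf (c :: t)
      · obtain ⟨sym, hsym, hp⟩ := hM
        obtain ⟨X, hX⟩ := List.isPrefixOf_iff_prefix.mp hp
        have hXlen : X.length ≤ n := by
          have := congrArg List.length hX
          rw [List.length_append, patL_length] at this
          simp at this hcs
          omega
        rw [← hX, foldAll_pat sym hsym X, scanB_pat sym hsym X, ih X hXlen]
      · push_neg at hM
        have h1 : foldAll (c :: t) = c :: foldAll t := foldAll_cons c t hM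
        have h2 : scanB (c :: t) = c :: scanB t := scanB_cons c t hM
        rw [h1, h2, ih t (by simp at hcs; omega)]

lemma main_list (cs : List Char) : foldAll cs = scanB cs := main_aux cs.length cs le_rfl

-- bridge the two ports to the list level -----------------------------------
lemma foldl_str_eq (L : List String) (s : String)
    (hL : ∀ x ∈ L, x ∈ symbolList) :
    (List.foldl
      (fun c sym =>
        PySem.Str.replace c ("<img src=\"/img/symbole/mana/" ++ sym ++ ".png\"") ("{" ++ sym ++ "}"))
      s L).toList
      = List.foldl stepA s.toList (L.map String.toList) := by
  induction L generalizing s with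
  | nil => rfl
  | cons x L' ih =>
    simp only [List.foldl_cons, List.map_cons]
    rw [ih _ (fun y hy => hL y (by simp [hy]))]
    congr 1
    rw [PySem.Str.toList_replace]
    rw [chars_replace_eq _ _ _ ?hne]
    case hne =>
      simp only [String.toList_append]
      intro hnil
      have := congrArg List.length hnil
      simp at this
    show repl _ _ s.toList = stepA s.toList x.toList
    simp only [stepA]
    congr 1
    · show ("<img src=\"/img/symbole/mana/" ++ x ++ ".png\"" : String).toList = patL x.toList
      simp only [String.toList_append, patL, patT]
      have h1 : ("<img src=\"/img/symbole/mana/" : String).toList = preL := by decide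
      have h2 : (".png\"" : String).toList = pngL ++ ['"'] := by decide
      rw [h1, h2]
      simp [List.append_assoc]
    · show ("{" ++ x ++ "}" : String).toList = repL x.toList
      simp only [String.toList_append, repL]
      have h1 : ("{" : String).toList = ['{'] := by decide
      have h2 : ("}" : String).toList = ['}'] := by decide
      rw [h1, h2]
      simp

-- ===== VERDICT (by name: the statement is the Claim_ definition above) =====
theorem convertMana_spec : Claim_equal_convertMana := by
  intro cardInfo _
  unfold Spec_convertMana convertMana convertMana_alt
  simp only [bCleanups, List.foldl_cons, List.foldl_nil]
  apply String.toList_inj.mp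
  rw [String.toList_ofList]
  rw [foldl_str_eq symbolList _ (fun x hx => hx)]
  exact main_list _
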